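-- pv_equiv track=rewrite | github.com/Ox-in-Chair/OHiSee_Youtube_Transcipt_Scraper | src/modules/intel_001/roi_scorer.py | _detect_frequency
-- ===== SOURCE A (Python) =====
-- from typing import Dict, List, Optional
--
-- def _detect_frequency(item: Dict) -> str:
--     """
--     Detect usage frequency from item description
--
--     Args:
--         item: Notable item dict
--
--     Returns:
--         Frequency string: "daily" | "weekly" | "monthly" | "rarely"
--     """
--     text = f"{item.get('title', '')} {item.get('description', '')}".lower()
--
--     # Daily indicators
--     daily_keywords = [
--         "every time",
--         "whenever you",
--         "each time",
--         "daily",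
--         "constantly",
--         "always",
--         "every project",
--     ]
--     if any(kw in text for kw in daily_keywords):
--         return "daily"
--
--     # Weekly indicators
--     weekly_keywords = [
--         "weekly",
--         "sprint",
--         "standup",
--         "meeting",
--         "report",
--         "review",
--     ]
--     if any(kw in text for kw in weekly_keywords):
--         return "weekly"
--
--     # Monthly indicators
--     monthly_keywords = ["monthly", "quarterly", "analysis", "summary"]
--     if any(kw in text for kw in monthly_keywords):
--         return "monthly"
--
--     # Rarely indicators
--     rarely_keywords = ["rarely", "occasionally", "sometimes", "when needed"]
--     if any(kw in text for kw in rarely_keywords):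
--         return "rarely"
--
--     # Default based on tag
--     tag = item.get("tag", "").lower()
--     if tag in ["protocol", "workflow"]:
--         return "daily"
--     elif tag in ["tool", "command"]:
--         return "weekly"
--     else:
--         return "monthly"
-- ===== SOURCE B (Python) =====
-- # B: instead of staged "check this list, return on first hit" branches, build one
-- # keyword->rank index and make a single aggregation pass computing the MINIMUM rank
-- # among all keywords occurring in the text; the rank picks the answer.
-- _RANK = {}
-- for _r, _kws in enumerate([
--     ["every time", "whenever you", "each time", "daily",
--      "constantly", "always", "every project"],
--     ["weekly", "sprint", "standup", "meeting", "report", "review"],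
--     ["monthly", "quarterly", "analysis", "summary"],
--     ["rarely", "occasionally", "sometimes", "when needed"],
-- ]):
--     for _kw in _kws:
--         _RANK[_kw] = _r
--
-- _NAMES = ["daily", "weekly", "monthly", "rarely"]
--
--
-- def _detect_frequency(item):
--     text = f"{item.get('title', '')} {item.get('description', '')}".lower()
--     best = min((r for kw, r in _RANK.items() if kw in text), default=4)
--     if best < 4:
--         return _NAMES[best]
--     tag = item.get("tag", "").lower()
--     return {"protocol": "daily", "workflow": "daily",
--             "tool": "weekly", "command": "weekly"}.get(tag, "monthly")
-- ===== Notes on version B (the rewrite author's own statement) =====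
-- stated objective: alternative
-- what changed: Replaces the four staged any()-with-early-return keyword checks by one keyword->rank index built once and a single aggregation pass taking the minimum rank over all keywords found in the text; the tag if/elif fallback becomes a dict lookup.
import Mathlib
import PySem

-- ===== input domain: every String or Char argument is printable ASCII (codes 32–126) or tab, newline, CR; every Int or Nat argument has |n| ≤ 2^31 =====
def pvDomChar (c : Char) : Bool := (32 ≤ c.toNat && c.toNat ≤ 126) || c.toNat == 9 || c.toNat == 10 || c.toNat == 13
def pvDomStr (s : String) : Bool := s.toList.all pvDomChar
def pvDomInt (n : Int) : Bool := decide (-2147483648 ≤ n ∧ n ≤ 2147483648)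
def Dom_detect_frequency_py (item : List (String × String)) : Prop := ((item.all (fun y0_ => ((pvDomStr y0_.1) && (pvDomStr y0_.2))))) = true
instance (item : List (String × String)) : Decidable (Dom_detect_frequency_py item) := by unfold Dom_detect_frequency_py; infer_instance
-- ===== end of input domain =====

-- B replaces A's staged early-return keyword branches with one keyword->rank index and a single min-rank aggregation pass, and the tag if/elif chain with a dict lookup (objective: alternative).


-- ===== PORT A =====
def detect_frequency_py (item : List (String × String)) : String :=
  let d := PySem.Dict.mk item
  let text := PySem.Str.lower (PySem.Str.join " " [d.getD "title" "", d.getD "description" ""])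
  let daily_keywords : List String :=
    ["every time", "whenever you", "each time", "daily", "constantly", "always", "every project"]
  if daily_keywords.any (fun kw => PySem.Str.isIn kw text) then "daily"
  else
    let weekly_keywords : List String := ["weekly", "sprint", "standup", "meeting", "report", "review"]
    if weekly_keywords.any (fun kw => PySem.Str.isIn kw text) then "weekly"
    else
      let monthly_keywords : List String := ["monthly", "quarterly", "analysis", "summary"]
      if monthly_keywords.any (fun kw => PySem.Str.isIn kw text) then "monthly"
      else
        let rarely_keywords : List String := ["rarely", "occasionally", "sometimes", "when needed"]
        if rarely_keywords.any (fun kw => PySem.Str.isIn kw text) then "rarely"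
        else
          let tag := PySem.Str.lower (d.getD "tag" "")
          if ["protocol", "workflow"].contains tag then "daily"
          else if ["tool", "command"].contains tag then "weekly"
          else "monthly"

-- ===== PORT B =====
-- the four keyword groups, in rank order (module-level list literal in Source B)
def pvGroups : List (List String) :=
  [["every time", "whenever you", "each time", "daily", "constantly", "always", "every project"],
   ["weekly", "sprint", "standup", "meeting", "report", "review"],
   ["monthly", "quarterly", "analysis", "summary"],
   ["rarely", "occasionally", "sometimes", "when needed"]]

-- the keyword->rank index _RANK built by the two module-level loops (no duplicate
-- keywords across groups, so dict insertion = this association list)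
def pvRank : List (String × Int) :=
  (PySem.List.enumerate pvGroups).flatMap (fun p => p.2.map (fun kw => (kw, p.1)))

def pvNames : List String := ["daily", "weekly", "monthly", "rarely"]

def pvTagDefault : PySem.Dict String String :=
  PySem.Dict.mk [("protocol", "daily"), ("workflow", "daily"), ("tool", "weekly"), ("command", "weekly")]

def detect_frequency_py_alt (item : List (String × String)) : String :=
  let d := PySem.Dict.mk item
  let text := PySem.Str.lower (PySem.Str.join " " [d.getD "title" "", d.getD "description" ""])
  -- min((r for kw, r in _RANK.items() if kw in text), default=4)
  let best := PySem.List.minD (pvRank.filterMap (fun p => if PySem.Str.isIn p.1 text then some p.2 else none)) id 4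
  if best < 4 then
    -- _NAMES[best]: the guard best < 4 (and 0 ≤ every rank) keeps the index in range, so pyGet? is some
    (PySem.List.pyGet? pvNames best).getD ""
  else
    let tag := PySem.Str.lower (d.getD "tag" "")
    pvTagDefault.getD tag "monthly"

-- ===== PRECONDITION & SPEC =====
def Spec_detect_frequency_py (item : List (String × String)) (out : String) : Prop := out = detect_frequency_py_alt item
instance (item : List (String × String)) (out : String) : Decidable (Spec_detect_frequency_py item out) := by unfold Spec_detect_frequency_py; infer_instance

-- ===== CLAIM (what is proved, stated in full; the proofs are below) =====
def Claim_equal_detect_frequency_py : Prop := ∀ (item : List (String × String)), Dom_detect_frequency_py item → Spec_detect_frequency_py item (detect_frequency_py item)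

-- ===== LEMMAS AND PROOFS =====

-- B's tag-default dict lookup equals A's if/elif tag chain.
theorem pv_tag (g : String) :
    (if ["protocol", "workflow"].contains g then "daily"
     else if ["tool", "command"].contains g then "weekly"
     else ("monthly" : String)) = pvTagDefault.getD g "monthly" := by
  by_cases hp : g = "protocol"
  · subst hp; decide
  by_cases hw : g = "workflow"
  · subst hw; decide
  by_cases ht : g = "tool"
  · subst ht; decide
  by_cases hc : g = "command"
  · subst hc; decide
  have bp : ("protocol" == g) = false := beq_eq_false_iff_ne.mpr (Ne.symm hp)
  have bw : ("workflow" == g) = false := beq_eq_false_iff_ne.mpr (Ne.symm hw)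
  have bt : ("tool" == g) = false := beq_eq_false_iff_ne.mpr (Ne.symm ht)
  have bc : ("command" == g) = false := beq_eq_false_iff_ne.mpr (Ne.symm hc)
  simp [pvTagDefault, PySem.Dict.getD, PySem.Dict.get?, List.find?, hp, hw, ht, hc, bp, bw, bt, bc]

-- filtering a constant-rank group yields a replicate of that rank
theorem pv_filt_group (kws : List String) (r : Int) (t : String) :
    List.filterMap (fun p => if PySem.Str.isIn p.1 t then some p.2 else none)
      (kws.map (fun kw => (kw, r)))
    = List.replicate (kws.filter (fun kw => PySem.Str.isIn kw t)).length r := by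
  induction kws with
  | nil => rfl
  | cons k ks ih =>
      simp only [PySem.Str.isIn] at ih ⊢
      by_cases h : PySem.Chars.isIn k.toList t.toList
      · simp [h, ih, List.replicate_succ]
      · simp [h, ih]

-- the min?-fold step over a block of equal ranks
theorem pv_fold_const (f : Option Int → Int → Option Int)
    (hf : ∀ acc x, f acc x = match acc with
        | none => some x
        | some m => if x < m then some x else some m)
    (r : Int) : ∀ (k : Nat) (acc : Option Int),
    List.foldl f acc (List.replicate k r)
    = if k = 0 then acc else some (match acc with | none => r | some m => min m r) := by
  intro k
  induction k with
  | zero => intro acc; simp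
  | succ n ih =>
      intro acc
      rw [List.replicate_succ, List.foldl_cons, ih, hf]
      rcases acc with _ | m
      · by_cases hn : n = 0 <;> simp [hn, min_self]
      · rcases lt_or_ge r m with hr | hr
        · have hmin : min m r = r := min_eq_right hr.le
          by_cases hn : n = 0 <;> simp [hn, hr, hmin, min_self]
        · have hir : ¬ r < m := not_lt.mpr hr
          have hmin : min m r = m := min_eq_left hr
          by_cases hn : n = 0 <;> simp [hn, hir, hmin]

-- a group's filtered length is zero iff its any() is false (ite-condition form of pv_any_len)
theorem pv_len_eq (kws : List String) (t : String) :
    ((kws.filter (fun kw => PySem.Str.isIn kw t)).length = 0)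
      = ((kws.any (fun kw => PySem.Str.isIn kw t)) = false) := by
  simp only [eq_iff_iff, List.length_eq_zero_iff, List.filter_eq_nil_iff, List.any_eq_false]

-- the heart of the equivalence: staged early-return checks = min-rank aggregation, for any text and tag
theorem pv_key (t g : String) :
    (if ["every time", "whenever you", "each time", "daily", "constantly", "always", "every project"].any (fun kw => PySem.Str.isIn kw t) then "daily"
     else if ["weekly", "sprint", "standup", "meeting", "report", "review"].any (fun kw => PySem.Str.isIn kw t) then "weekly"
     else if ["monthly", "quarterly", "analysis", "summary"].any (fun kw => PySem.Str.isIn kw t) then "monthly"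
     else if ["rarely", "occasionally", "sometimes", "when needed"].any (fun kw => PySem.Str.isIn kw t) then "rarely"
     else if ["protocol", "workflow"].contains g then "daily"
     else if ["tool", "command"].contains g then "weekly"
     else "monthly")
    = (if PySem.List.minD (pvRank.filterMap (fun p => if PySem.Str.isIn p.1 t then some p.2 else none)) id 4 < 4
       then (PySem.List.pyGet? pvNames (PySem.List.minD (pvRank.filterMap (fun p => if PySem.Str.isIn p.1 t then some p.2 else none)) id 4)).getD ""
       else pvTagDefault.getD g "monthly") := by
  have hR : pvRank =
      (["every time", "whenever you", "each time", "daily", "constantly", "always", "every project"].map (fun kw => (kw, (0 : Int))))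
      ++ (["weekly", "sprint", "standup", "meeting", "report", "review"].map (fun kw => (kw, (1 : Int))))
      ++ (["monthly", "quarterly", "analysis", "summary"].map (fun kw => (kw, (2 : Int))))
      ++ (["rarely", "occasionally", "sometimes", "when needed"].map (fun kw => (kw, (3 : Int)))) := by
    decide
  rw [hR]
  rw [List.filterMap_append, List.filterMap_append, List.filterMap_append]
  rw [pv_filt_group, pv_filt_group, pv_filt_group, pv_filt_group]
  rw [pv_tag g]
  unfold PySem.List.minD PySem.List.min?
  rw [List.foldl_append, List.foldl_append, List.foldl_append]
  rw [pv_fold_const _ (fun acc x => by cases acc <;> rfl),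
      pv_fold_const _ (fun acc x => by cases acc <;> rfl),
      pv_fold_const _ (fun acc x => by cases acc <;> rfl),
      pv_fold_const _ (fun acc x => by cases acc <;> rfl)]
  simp only [pv_len_eq]
  cases h0 : ["every time", "whenever you", "each time", "daily", "constantly", "always", "every project"].any (fun kw => PySem.Str.isIn kw t) <;>
  cases h1 : ["weekly", "sprint", "standup", "meeting", "report", "review"].any (fun kw => PySem.Str.isIn kw t) <;>
  cases h2 : ["monthly", "quarterly", "analysis", "summary"].any (fun kw => PySem.Str.isIn kw t) <;>
  cases h3 : ["rarely", "occasionally", "sometimes", "when needed"].any (fun kw => PySem.Str.isIn kw t) <;>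
    simp only [h0, h1, h2, h3] <;> norm_num [PySem.List.pyGet?, PySem.List.pyIdx?, pvNames, min_def] <;> rfl

-- ===== VERDICT (by name: the statement is the Claim_ definition above) =====
theorem detect_frequency_py_spec : Claim_equal_detect_frequency_py := by
  intro item _
  unfold Spec_detect_frequency_py detect_frequency_py detect_frequency_py_alt
  exact pv_key _ _
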